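-- pv_equiv track=rewrite | github.com/adelinarf/Tarea4 | subarreglobueno.py | subarreglos_buenos
-- ===== SOURCE A (Python) =====
-- def verificar_bueno(subconjunto): #O(n)
-- 	es=False
-- 	uno=True
-- 	if len(subconjunto)!=0:
-- 		for x in range(len(subconjunto)):
-- 			if subconjunto[x]%(x+1)==0:
-- 				es=True
-- 			else:
-- 				es=False
-- 				uno=False
-- 	return (es and uno)
--
-- def subarreglos_buenos(A):
-- 	A = [[x] for x in A]
-- 	buenos = []
-- 	for x in range(len(A)):
-- 		for y in range(len(buenos)):
-- 			if verificar_bueno(buenos[y]+A[x]):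
-- 				buenos.append(buenos[y]+A[x])
-- 		if verificar_bueno(A[x]):
-- 			buenos.append(A[x])
-- 	return buenos
-- ===== SOURCE B (Python) =====
-- def subarreglos_buenos(A):
--     # Invariant: every list in buenos is already good, so extending a good list g
--     # by a stays good iff a % (len(g)+1) == 0; a singleton [a] is always good.
--     buenos = []
--     for a in A:
--         nuevos = [g + [a] for g in buenos if a % (len(g) + 1) == 0]
--         buenos.extend(nuevos)
--         buenos.append([a])
--     return buenos
-- ===== Notes on version B (the rewrite author's own statement) =====
-- stated objective: faster
-- what changed: A re-verifies every candidate buenos[y]+[x] element by element with verificar_bueno (and re-checks singletons); B exploits the invariant that every stored list is already good, so extending it stays good iff the new element is divisible by its 1-based position — one O(1) modulo test per stored list and no check at all for singletons.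
import Mathlib
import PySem

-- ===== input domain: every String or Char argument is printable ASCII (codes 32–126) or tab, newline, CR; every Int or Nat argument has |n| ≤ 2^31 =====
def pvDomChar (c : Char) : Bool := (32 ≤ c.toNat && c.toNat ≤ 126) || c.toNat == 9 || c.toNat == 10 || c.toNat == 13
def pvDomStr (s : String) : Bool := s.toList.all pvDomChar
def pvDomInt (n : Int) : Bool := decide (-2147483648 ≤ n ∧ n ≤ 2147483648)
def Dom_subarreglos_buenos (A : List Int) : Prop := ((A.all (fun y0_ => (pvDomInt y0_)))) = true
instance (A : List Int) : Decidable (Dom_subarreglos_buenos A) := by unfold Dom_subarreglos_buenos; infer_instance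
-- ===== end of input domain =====

-- B replaces A's rebuild-and-reverify of every candidate (verificar_bueno on each
-- buenos[y]+[x]) by an O(1) divisibility check on the new last position, using the
-- invariant that every stored list is already good.

-- ===== PORT A =====
def verificar_bueno (s : List Int) : Bool :=
  -- es=False; uno=True; for x in range(len(s)): …; return es and uno
  let r : Bool × Bool :=
    if s.length ≠ 0 then
      (PySem.List.pyRange 0 (s.length : Int) 1).foldl
        (fun (p : Bool × Bool) x =>
          if PySem.Int.mod (PySem.List.pyGetD s x 0) (x + 1) == 0 then (true, p.2)
          else (false, false))
        (false, true)
    else (false, true)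
  r.1 && r.2

def subarreglos_buenos (A : List Int) : List (List Int) :=
  let A' := A.map (fun x => [x])
  A'.foldl
    (fun buenos ax =>
      let b2 := (PySem.List.pyRange 0 (buenos.length : Int) 1).foldl
        (fun b y =>
          if verificar_bueno (PySem.List.pyGetD b y [] ++ ax) then
            b ++ [PySem.List.pyGetD b y [] ++ ax]
          else b)
        buenos
      if verificar_bueno ax then b2 ++ [ax] else b2)
    []

-- ===== PORT B =====
def subarreglos_buenos_alt (A : List Int) : List (List Int) :=
  A.foldl
    (fun buenos a =>
      let nuevos := (buenos.filter (fun g => PySem.Int.mod a ((g.length : Int) + 1) == 0)).map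
        (fun g => g ++ [a])
      (buenos ++ nuevos) ++ [[a]])
    []

-- ===== PRECONDITION & SPEC =====
def Spec_subarreglos_buenos (A : List Int) (out : List (List Int)) : Prop := out = subarreglos_buenos_alt A
instance (A : List Int) (out : List (List Int)) : Decidable (Spec_subarreglos_buenos A out) := by unfold Spec_subarreglos_buenos; infer_instance

-- ===== CLAIM (what is proved, stated in full; the proofs are below) =====
def Claim_equal_subarreglos_buenos : Prop := ∀ (A : List Int), Dom_subarreglos_buenos A → Spec_subarreglos_buenos A (subarreglos_buenos A)

-- ===== LEMMAS AND PROOFS =====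

theorem verificar_singleton (a : Int) : verificar_bueno [a] = true := by
  have h1 : PySem.Int.mod a 1 = 0 := (PySem.Int.mod_eq_zero_iff_dvd a 1).mpr (one_dvd a)
  have hr : PySem.List.pyRange (0:Int) 1 = [0] := by decide
  simp [verificar_bueno, hr, PySem.List.pyGetD, PySem.List.pyGet?, PySem.List.pyIdx?]

theorem pyGetD_append_left {α : Type} (l1 l2 : List α) (x : Int) (d : α)
    (h0 : 0 ≤ x) (h1 : x < (l1.length : Int)) :
    PySem.List.pyGetD (l1 ++ l2) x d = PySem.List.pyGetD l1 x d := by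
  obtain ⟨k, rfl⟩ : ∃ k : Nat, x = (k : Int) := ⟨x.toNat, (Int.toNat_of_nonneg h0).symm⟩
  rw [PySem.List.pyGetD_natCast, PySem.List.pyGetD_natCast]
  exact List.getD_append _ _ _ _ (by exact_mod_cast h1)

theorem pyGetD_append_right_zero {α : Type} (l1 : List α) (g : α) (l2 : List α) (d : α) :
    PySem.List.pyGetD (l1 ++ g :: l2) (l1.length : Int) d = g := by
  rw [PySem.List.pyGetD_natCast]
  simp [List.getD]

theorem verificar_extend (g : List Int) (a : Int) (hg : verificar_bueno g = true) :
    verificar_bueno (g ++ [a]) = (PySem.Int.mod a ((g.length : Int) + 1) == 0) := by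
  have hne : g ≠ [] := by rintro rfl; simp [verificar_bueno] at hg
  have hl : g.length ≠ 0 := by simpa using hne
  have hcast : ((g.length + (0 + 1) : Nat) : Int) = (g.length : Int) + 1 := by push_cast; ring
  have hsplit : PySem.List.pyRange 0 ((g.length : Int) + 1) 1
      = PySem.List.pyRange 0 (g.length : Int) 1 ++ [(g.length : Int)] :=
    PySem.List.pyRange_one_succ_right (by positivity)
  unfold verificar_bueno
  simp only [List.length_append, List.length_cons, List.length_nil]
  rw [if_pos (by omega), hcast, hsplit, List.foldl_append]
  have hcongr :
      (PySem.List.pyRange 0 (g.length : Int) 1).foldl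
        (fun (p : Bool × Bool) x =>
          if PySem.Int.mod (PySem.List.pyGetD (g ++ [a]) x 0) (x + 1) == 0 then (true, p.2)
          else (false, false)) (false, true)
      = (PySem.List.pyRange 0 (g.length : Int) 1).foldl
        (fun (p : Bool × Bool) x =>
          if PySem.Int.mod (PySem.List.pyGetD g x 0) (x + 1) == 0 then (true, p.2)
          else (false, false)) (false, true) := by
    apply PySem.List.foldl_congr_mem
    intro acc x hx
    obtain ⟨hx0, hx1⟩ := PySem.List.mem_pyRange_one.mp hx
    rw [pyGetD_append_left g [a] x 0 hx0 hx1]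
  rw [hcongr]
  have hr : (PySem.List.pyRange 0 (g.length : Int) 1).foldl
        (fun (p : Bool × Bool) x =>
          if PySem.Int.mod (PySem.List.pyGetD g x 0) (x + 1) == 0 then (true, p.2)
          else (false, false)) (false, true) = (true, true) := by
    unfold verificar_bueno at hg
    rw [if_pos hl] at hg
    set r := (PySem.List.pyRange 0 (g.length : Int) 1).foldl
        (fun (p : Bool × Bool) x =>
          if PySem.Int.mod (PySem.List.pyGetD g x 0) (x + 1) == 0 then (true, p.2)
          else (false, false)) (false, true) with hrdef
    obtain ⟨b1, b2⟩ := r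
    simp_all
  rw [hr]
  have hget : PySem.List.pyGetD (g ++ [a]) (g.length : Int) 0 = a :=
    pyGetD_append_right_zero g a [] 0
  simp only [List.foldl_cons, List.foldl_nil, hget]
  cases h : (PySem.Int.mod a ((g.length : Int) + 1) == 0) <;> simp

theorem inner_aux (x : Int) (todo : List (List Int)) :
    ∀ (pre rest : List (List Int)),
    (∀ g ∈ todo, verificar_bueno g = true) →
    (PySem.List.pyRange (pre.length : Int) ((pre.length : Int) + (todo.length : Int)) 1).foldl
      (fun b y =>
        if verificar_bueno (PySem.List.pyGetD b y [] ++ [x]) then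
          b ++ [PySem.List.pyGetD b y [] ++ [x]]
        else b)
      ((pre ++ todo) ++ rest)
    = ((pre ++ todo) ++ rest) ++
        ((todo.filter (fun g => PySem.Int.mod x ((g.length : Int) + 1) == 0)).map (fun g => g ++ [x])) := by
  induction todo with
  | nil =>
    intro pre rest _
    simp [PySem.List.pyRange_one_eq_nil (le_refl (pre.length : Int))]
  | cons g todo' ih =>
    intro pre rest hgood
    have hlt : (pre.length : Int) < (pre.length : Int) + ((g :: todo').length : Int) := by
      simp
    rw [PySem.List.pyRange_one_cons hlt, List.foldl_cons]
    have hget : PySem.List.pyGetD ((pre ++ g :: todo') ++ rest) (pre.length : Int) [] = g := by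
      rw [List.append_assoc, List.cons_append]
      exact pyGetD_append_right_zero pre g (todo' ++ rest) []
    rw [hget, verificar_extend g x (hgood g (List.mem_cons_self))]
    have hend : (pre.length : Int) + ((g :: todo').length : Int)
        = (((pre ++ [g]).length : Nat) : Int) + (todo'.length : Int) := by
      simp; omega
    have hstart : (pre.length : Int) + 1 = (((pre ++ [g]).length : Nat) : Int) := by
      simp
    have hgood' : ∀ g' ∈ todo', verificar_bueno g' = true :=
      fun g' h => hgood g' (List.mem_cons_of_mem g h)
    cases hc : (PySem.Int.mod x ((g.length : Int) + 1) == 0) with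
    | true =>
      rw [if_pos rfl]
      have hstate : ((pre ++ g :: todo') ++ rest) ++ [g ++ [x]]
          = (((pre ++ [g]) ++ todo') ++ (rest ++ [g ++ [x]])) := by
        simp
      rw [hstate, hstart, hend, ih (pre ++ [g]) (rest ++ [g ++ [x]]) hgood', List.filter_cons]
      simp only [hc, if_true]
      simp
    | false =>
      rw [if_neg (by simp)]
      have hstate : ((pre ++ g :: todo') ++ rest) = (((pre ++ [g]) ++ todo') ++ rest) := by simp
      rw [hstate, hstart, hend, ih (pre ++ [g]) rest hgood', List.filter_cons]
      simp only [hc, if_false, Bool.false_eq_true]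

theorem fold_eq (A : List Int) :
    ∀ (buenos : List (List Int)), (∀ g ∈ buenos, verificar_bueno g = true) →
    (A.map (fun x => [x])).foldl
      (fun buenos ax =>
        let b2 := (PySem.List.pyRange 0 (buenos.length : Int) 1).foldl
          (fun b y =>
            if verificar_bueno (PySem.List.pyGetD b y [] ++ ax) then
              b ++ [PySem.List.pyGetD b y [] ++ ax]
            else b)
          buenos
        if verificar_bueno ax then b2 ++ [ax] else b2)
      buenos
    = A.foldl
      (fun buenos a =>
        let nuevos := (buenos.filter (fun g => PySem.Int.mod a ((g.length : Int) + 1) == 0)).map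
          (fun g => g ++ [a])
        (buenos ++ nuevos) ++ [[a]])
      buenos := by
  induction A with
  | nil => intro buenos _; simp
  | cons a A' ih =>
    intro buenos hgood
    simp only [List.map_cons, List.foldl_cons]
    have hinner := inner_aux a buenos [] [] hgood
    simp only [List.length_nil, Nat.cast_zero, zero_add, List.nil_append, List.append_nil] at hinner
    rw [hinner, if_pos (verificar_singleton a)]
    have hgood' : ∀ g ∈ (buenos ++
        ((buenos.filter (fun g => PySem.Int.mod a ((g.length : Int) + 1) == 0)).map
          (fun g => g ++ [a]))) ++ [[a]], verificar_bueno g = true := by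
      intro g hg
      rcases List.mem_append.mp hg with hg | hg
      · rcases List.mem_append.mp hg with hg | hg
        · exact hgood g hg
        · obtain ⟨g', hg', rfl⟩ := List.mem_map.mp hg
          have ⟨hg'', hc⟩ := List.mem_filter.mp hg'
          rw [verificar_extend g' a (hgood g' hg'')]
          exact hc
      · simp at hg
        subst hg
        exact verificar_singleton a
    exact ih _ hgood'

-- ===== VERDICT (by name: the statement is the Claim_ definition above) =====
theorem subarreglos_buenos_spec : Claim_equal_subarreglos_buenos := by
  intro A _
  unfold Spec_subarreglos_buenos subarreglos_buenos subarreglos_buenos_alt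
  exact fold_eq A [] (by simp)
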